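-- pv_equiv track=rewrite | github.com/HyeyeonKoo/algorithm | 20190907_프로그래머스_예산.py | solution
-- ===== SOURCE A (Python) =====
-- def solution(budgets, M):
--
--     answer = 0
--
--     if sum(budgets) <= M:
--         answer = max(budgets)
--     else:
--         left = 0
--         right = max(budgets)
--         while left <= right:
--             mid = (left + right) // 2
--             total = 0
--             for b in budgets:
--                 if b < mid:
--                     total += b
--                 else:
--                     total += mid
--             if total <= M:
--                 answer = mid
--                 left = mid + 1
--             else:
--                 right = mid - 1
--
--     return answer
-- ===== SOURCE B (Python) =====
-- def solution(budgets, M):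
--     if sum(budgets) <= M:
--         return max(budgets)
--     s = sorted(budgets)
--     n = len(s)
--     pfx = 0
--     i = 0
--     # sum(budgets) > M guarantees the loop stops at some i <= n-1
--     while pfx + s[i] * (n - i) <= M:
--         pfx += s[i]
--         i += 1
--     return max((M - pfx) // (n - i), 0)
-- ===== Notes on version B (the rewrite author's own statement) =====
-- stated objective: alternative
-- what changed: A binary-searches the cap in [0, max] recomputing the full allocation sum at every probe; B sorts once and walks the sorted list with a running prefix sum to locate the segment containing the answer, then computes the cap with one floor division.
import Mathlib
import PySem

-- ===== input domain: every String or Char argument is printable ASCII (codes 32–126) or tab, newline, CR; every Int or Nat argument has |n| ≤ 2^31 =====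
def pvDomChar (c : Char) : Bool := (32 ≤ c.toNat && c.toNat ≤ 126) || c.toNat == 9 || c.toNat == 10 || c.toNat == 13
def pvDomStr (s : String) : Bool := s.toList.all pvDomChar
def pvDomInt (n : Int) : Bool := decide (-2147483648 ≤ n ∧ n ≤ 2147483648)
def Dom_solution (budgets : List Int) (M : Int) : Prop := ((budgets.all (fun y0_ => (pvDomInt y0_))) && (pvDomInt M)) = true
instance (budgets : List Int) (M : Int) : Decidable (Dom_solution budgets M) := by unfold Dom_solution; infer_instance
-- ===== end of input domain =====

-- B replaces A's binary search over the cap (a full allocation sum per probe) by one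
-- sort + a single prefix-sum scan locating the answer's segment, closed by a floor
-- division (objective: alternative algorithm, similar cost).


-- ===== PORT A =====
-- the inner 'for b in budgets: total += b if b < mid else mid' loop
def costA (budgets : List Int) (mid : Int) : Int :=
  budgets.foldl (fun total b => if b < mid then total + b else total + mid) 0

-- the 'while left <= right' binary-search loop, state (left, right, answer)
def bsearch (budgets : List Int) (M left right answer : Int) : Int :=
  if h : left ≤ right then
    let mid := PySem.Int.floordiv (left + right) 2
    if costA budgets mid ≤ M then bsearch budgets M (mid + 1) right mid
    else bsearch budgets M left (mid - 1) answer
  else answer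
termination_by (right + 1 - left).toNat
decreasing_by
  · have := PySem.Int.floordiv_two_mid_bounds h; omega
  · have := PySem.Int.floordiv_two_mid_bounds h; omega

-- max(budgets) raises ValueError on []: Pre_solution excludes the empty list; getD 0 is never used there
def solution (budgets : List Int) (M : Int) : Int :=
  if budgets.sum ≤ M then (PySem.List.max? budgets (fun x => x)).getD 0
  else bsearch budgets M 0 ((PySem.List.max? budgets (fun x => x)).getD 0) 0

-- ===== PORT B =====
-- Source B's 'while pfx + s[i] * (n - i) <= M' scan over the sorted list; the [] case is where
-- Python's s[i] would raise IndexError — unreachable when sum(budgets) > M (proved below)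
def bScan (rest : List Int) (M n i pfx : Int) : Int :=
  match rest with
  | [] => 0
  | b :: t =>
    if pfx + b * (n - i) ≤ M then bScan t M n (i + 1) (pfx + b)
    else max (PySem.Int.floordiv (M - pfx) (n - i)) 0

def solution_alt (budgets : List Int) (M : Int) : Int :=
  if budgets.sum ≤ M then (PySem.List.max? budgets (fun x => x)).getD 0
  else
    let s := PySem.List.sorted budgets (fun x => x)
    bScan s M (s.length : Int) 0 0

-- ===== PRECONDITION & SPEC =====
-- Pre_ excludes only budgets = [], on which A raises ValueError (max of an empty sequence)
def Pre_solution (budgets : List Int) (M : Int) : Prop := budgets ≠ []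
instance (budgets : List Int) (M : Int) : Decidable (Pre_solution budgets M) := by unfold Pre_solution; infer_instance

def pvWitness_solution : List Int × Int := ([1, 2, 3], 4)

def Spec_solution (budgets : List Int) (M : Int) (out : Int) : Prop := out = solution_alt budgets M
instance (budgets : List Int) (M : Int) (out : Int) : Decidable (Spec_solution budgets M out) := by unfold Spec_solution; infer_instance

-- ===== CLAIM (what is proved, stated in full; the proofs are below) =====
def Claim_equal_solution : Prop := ∀ (budgets : List Int) (M : Int), Dom_solution budgets M → Pre_solution budgets M → Spec_solution budgets M (solution budgets M)

-- ===== LEMMAS AND PROOFS =====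

-- the allocated total as a sum of min's
def mcost (l : List Int) (c : Int) : Int := (l.map (fun b => min b c)).sum

theorem costA_eq_mcost (l : List Int) (c : Int) : costA l c = mcost l c := by
  unfold costA mcost
  have hf : (fun (total b : Int) => if b < c then total + b else total + c)
      = (fun (total b : Int) => total + min b c) := by
    funext t b; by_cases h : b < c
    · simp [h, min_eq_left h.le]
    · simp [h, min_eq_right (by omega : c ≤ b)]
  rw [hf, PySem.List.foldl_add l (fun b => min b c) 0, zero_add]

theorem mcost_mono (l : List Int) {c c' : Int} (h : c ≤ c') : mcost l c ≤ mcost l c' := by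
  induction l with
  | nil => simp [mcost]
  | cons b t ih =>
    simp only [mcost, List.map_cons, List.sum_cons] at *
    exact add_le_add (min_le_min le_rfl h) ih

theorem mcost_perm {l l' : List Int} (h : l.Perm l') (c : Int) : mcost l c = mcost l' c :=
  (h.map (fun b => min b c)).sum_eq

theorem mcost_append (a b : List Int) (c : Int) : mcost (a ++ b) c = mcost a c + mcost b c := by
  simp [mcost]

theorem mcost_of_forall_le {l : List Int} {c : Int} (h : ∀ b ∈ l, b ≤ c) : mcost l c = l.sum := by
  unfold mcost
  rw [List.map_congr_left (fun b hb => min_eq_left (h b hb)), List.map_id']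

theorem mcost_of_forall_ge {l : List Int} {c : Int} (h : ∀ b ∈ l, c ≤ b) :
    mcost l c = (l.length : Int) * c := by
  unfold mcost
  rw [List.map_congr_left (fun b hb => min_eq_right (h b hb)), PySem.List.sum_map_const_int]

theorem costA_mono (l : List Int) {c c' : Int} (h : c ≤ c') : costA l c ≤ costA l c' := by
  rw [costA_eq_mcost, costA_eq_mcost]; exact mcost_mono l h

-- the binary-search loop returns the greatest feasible cap in [l, r] (or `ans` if none)
theorem bsearch_spec (bs : List Int) (M : Int) :
    ∀ (k : Nat) (l r ans : Int), (r + 1 - l).toNat ≤ k →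
      ((l ≤ r → costA bs l ≤ M →
          l ≤ bsearch bs M l r ans ∧ bsearch bs M l r ans ≤ r ∧
          costA bs (bsearch bs M l r ans) ≤ M ∧
          ∀ c, bsearch bs M l r ans < c → c ≤ r → M < costA bs c)
        ∧ (¬(l ≤ r ∧ costA bs l ≤ M) → bsearch bs M l r ans = ans)) := by
  intro k
  induction k with
  | zero =>
    intro l r ans hk
    have hlr : ¬ l ≤ r := by omega
    rw [bsearch, dif_neg hlr]
    exact ⟨fun h _ => absurd h hlr, fun _ => rfl⟩
  | succ k ih =>
    intro l r ans hk
    by_cases hlr : l ≤ r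
    · have hmid := PySem.Int.floordiv_two_mid_bounds hlr
      rw [bsearch, dif_pos hlr]
      set mid := PySem.Int.floordiv (l + r) 2 with hmiddef
      by_cases hp : costA bs mid ≤ M
      · rw [if_pos hp]
        have hsub := ih (mid + 1) r mid (by omega)
        constructor
        · intro _ _
          by_cases hc : mid + 1 ≤ r ∧ costA bs (mid + 1) ≤ M
          · obtain ⟨h1, h2, h3, h4⟩ := hsub.1 hc.1 hc.2
            exact ⟨by omega, h2, h3, h4⟩
          · have heq := hsub.2 hc
            rw [heq]
            refine ⟨by omega, by omega, hp, ?_⟩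
            intro c hc1 hc2
            by_cases hr : mid + 1 ≤ r
            · have hnp : ¬ costA bs (mid + 1) ≤ M := fun h => hc ⟨hr, h⟩
              have := costA_mono bs (show mid + 1 ≤ c by omega)
              omega
            · omega
        · intro hno
          exfalso
          have hl : costA bs l ≤ M := le_trans (costA_mono bs hmid.1) hp
          exact hno ⟨hlr, hl⟩
      · rw [if_neg hp]
        have hsub := ih l (mid - 1) ans (by omega)
        constructor
        · intro _ hfl
          have hlm : l ≤ mid - 1 := by
            by_contra hcon
            have : mid ≤ l := by omega
            have := costA_mono bs this
            omega
          obtain ⟨h1, h2, h3, h4⟩ := hsub.1 hlm hfl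
          refine ⟨h1, by omega, h3, ?_⟩
          intro c hc1 hc2
          by_cases hcm : c ≤ mid - 1
          · exact h4 c hc1 hcm
          · have := costA_mono bs (show mid ≤ c by omega)
            omega
        · intro hno
          have hnl : ¬ costA bs l ≤ M := fun h => hno ⟨hlr, h⟩
          exact hsub.2 (fun h => hnl h.2)
    · rw [bsearch, dif_neg hlr]
      exact ⟨fun h _ => absurd h hlr, fun _ => rfl⟩

-- the scan returns max rout 0 where rout is sandwiched: cost rout ≤ M < cost (rout+1)
theorem bScan_spec (M : Int) :
    ∀ (rest taken : List Int),
      List.Pairwise (· ≤ ·) (taken ++ rest) →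
      taken ++ rest ≠ [] →
      M < (taken ++ rest).sum →
      (taken = [] ∨ ∃ x ∈ taken, (∀ y ∈ taken, y ≤ x) ∧ taken.sum + x * (rest.length : Int) ≤ M) →
      ∃ rout : Int,
        bScan rest M (((taken ++ rest).length : Nat) : Int) ((taken.length : Nat) : Int) taken.sum
          = max rout 0 ∧
        mcost (taken ++ rest) rout ≤ M ∧ M < mcost (taken ++ rest) (rout + 1) := by
  intro rest
  induction rest with
  | nil =>
    intro taken hsort hne htot hinv
    exfalso
    rcases hinv with h | ⟨x, _, _, hx⟩
    · subst h; simp at hne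
    · simp at htot hx; omega
  | cons b t ih =>
    intro taken hsort hne htot hinv
    by_cases hp : taken.sum + b * ((((taken ++ b :: t).length : Nat) : Int) - ((taken.length : Nat) : Int)) ≤ M
    · -- condition passes: step with taken' = taken ++ [b]
      have hrec := ih (taken ++ [b]) (by rw [List.append_assoc]; simpa using hsort)
        (by simp) (by rw [List.append_assoc]; simpa using htot) ?_
      · obtain ⟨rout, h1, h2, h3⟩ := hrec
        refine ⟨rout, ?_, ?_, ?_⟩
        · rw [bScan, if_pos hp]
          rw [List.append_assoc] at h1
          simpa using h1
        · rw [List.append_assoc] at h2; simpa using h2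
        · rw [List.append_assoc] at h3; simpa using h3
      · -- new invariant witness: b (max of taken ++ [b], sorted)
        right
        refine ⟨b, by simp, ?_, ?_⟩
        · intro y hy
          rcases List.mem_append.mp hy with hy | hy
          · have := (List.pairwise_append.mp hsort).2.2 y hy b (by simp)
            exact this
          · simp at hy; omega
        · have : ((taken ++ [b]).sum) = taken.sum + b := by simp
          rw [this]
          have hlen : (((taken ++ b :: t).length : Nat) : Int) - ((taken.length : Nat) : Int)
              = (t.length : Int) + 1 := by simp
          rw [hlen] at hp
          nlinarith [hp]
    · -- condition violated: answer found here
      have hq : (((taken ++ b :: t).length : Nat) : Int) - ((taken.length : Nat) : Int)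
          = ((b :: t).length : Int) := by simp
      set q : Int := ((b :: t).length : Int) with hqdef
      have hqpos : 0 < q := by simp [hqdef]
      set c := PySem.Int.floordiv (M - taken.sum) q with hcdef
      have hcle : c * q ≤ M - taken.sum :=
        (PySem.Int.le_floordiv_iff_mul_le hqpos).mp le_rfl
      have hclt : M - taken.sum < (c + 1) * q :=
        (PySem.Int.floordiv_lt_iff_lt_mul hqpos).mp (by omega)
      have htle : ∀ y ∈ taken, y ≤ c := by
        intro y hy
        rcases hinv with h | ⟨x, hxmem, hxmax, hx⟩
        · subst h; simp at hy
        · have hxq : x * q ≤ M - taken.sum := by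
            have he : x * q = x * (((b :: t).length : Nat) : Int) := by rw [hqdef]
            omega
          exact le_trans (hxmax y hy) ((PySem.Int.le_floordiv_iff_mul_le hqpos).mpr hxq)
      have hcb : c < b := by
        rw [hq] at hp
        by_contra hcon
        have hbc : b ≤ c := by omega
        have : b * q ≤ c * q := mul_le_mul_of_nonneg_right hbc (by omega)
        omega
      have hrest : ∀ y ∈ b :: t, b ≤ y := by
        intro y hy
        rcases hy with _ | hy
        · exact le_rfl
        · exact List.rel_of_pairwise_cons (List.pairwise_append.mp hsort).2.1 (by assumption)
      refine ⟨c, ?_, ?_, ?_⟩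
      · rw [bScan, if_neg hp, hq]
      · rw [mcost_append, mcost_of_forall_le htle,
          mcost_of_forall_ge (fun y hy => le_trans (by omega : c ≤ b) (hrest y hy))]
        rw [← hqdef]; nlinarith [hcle]
      · rw [mcost_append, mcost_of_forall_le (fun y hy => le_trans (htle y hy) (by omega)),
          mcost_of_forall_ge (fun y hy => le_trans (by omega : c + 1 ≤ b) (hrest y hy))]
        rw [← hqdef]; nlinarith [hclt]

-- ===== VERDICT (by name: the statement is the Claim_ definition above) =====
theorem solution_spec : Claim_equal_solution := by
  intro budgets M _ hpre
  unfold Spec_solution solution solution_alt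
  by_cases hsum : budgets.sum ≤ M
  · rw [if_pos hsum, if_pos hsum]
  · rw [if_neg hsum, if_neg hsum]
    -- names for the sorted list and the maximum
    set s := PySem.List.sorted budgets (fun x => x) with hsdef
    have hperm : s.Perm budgets := PySem.List.sorted_perm budgets (fun x => x) false
    have hsort : List.Pairwise (· ≤ ·) s := PySem.List.sorted_pairwise budgets (fun x => x)
    have hsne : s ≠ [] := by
      intro h
      exact hpre ((PySem.List.sorted_eq_nil_iff budgets (fun x => x) false).mp h)
    have hssum : s.sum = budgets.sum := hperm.sum_eq
    obtain ⟨m, hm⟩ : ∃ m, PySem.List.max? budgets (fun x => x) = some m := by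
      cases hmq : PySem.List.max? budgets (fun x => x) with
      | none => exact absurd ((PySem.List.max?_eq_none_iff budgets (fun x => x)).mp hmq) hpre
      | some m => exact ⟨m, rfl⟩
    have hmmax : ∀ y ∈ budgets, y ≤ m := PySem.List.max?_isMax hm
    have hmmem : m ∈ budgets := PySem.List.max?_mem hm
    rw [hm]
    simp only [Option.getD_some]
    -- B's side: the sandwiched value rout
    obtain ⟨rout, hbeq, hble, hbgt⟩ := by
      refine bScan_spec M s [] (by simpa using hsort) (by simpa using hsne)
        (by simpa [hssum] using (by omega : M < budgets.sum)) (Or.inl rfl)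
    simp only [List.nil_append, List.sum_nil, List.length_nil, Nat.cast_zero] at hbeq hble hbgt
    rw [hbeq]
    -- translate costs from s to budgets
    have hclee : costA budgets rout ≤ M := by
      rw [costA_eq_mcost, ← mcost_perm hperm]; exact hble
    have hcgtt : M < costA budgets (rout + 1) := by
      rw [costA_eq_mcost, ← mcost_perm hperm]; exact hbgt
    have hcostm : M < costA budgets m := by
      rw [costA_eq_mcost, mcost_of_forall_le hmmax]; omega
    have hspec := bsearch_spec budgets M (m + 1 - 0).toNat 0 m 0 le_rfl
    by_cases hr : 0 ≤ rout
    · -- rout is the greatest feasible cap in [0, m]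
      have hrm : rout < m := by
        by_contra hcon
        have := costA_mono budgets (show m ≤ rout by omega)
        omega
      have h0 : costA budgets 0 ≤ M := le_trans (costA_mono budgets hr) hclee
      obtain ⟨h1, h2, h3, h4⟩ := hspec.1 (by omega) h0
      have : bsearch budgets M 0 m 0 = rout := by
        by_contra hne
        rcases lt_or_gt_of_ne hne with hlt | hgt
        · exact absurd (h4 rout hlt (by omega)) (by omega)
        · have := costA_mono budgets (show rout + 1 ≤ bsearch budgets M 0 m 0 by omega)
          omega
      rw [this]; omega
    · -- no feasible cap ≥ 0: both sides are 0
      have h0 : M < costA budgets 0 :=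
        lt_of_lt_of_le hcgtt (costA_mono budgets (by omega))
      have := hspec.2 (fun h => by omega)
      rw [this]; omega
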